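-- pv_equiv track=rewrite | github.com/aaronbae/competitive | codejam/manhattan_crepe.py | find_opt_index
-- ===== SOURCE A (Python) =====
-- def find_opt_index(Q, greater, less):
--     # edge cases
--     if not greater and not less:
--         return 0
--     elif not greater:
--         return max(0, less[0] - 1)
--     elif not less:
--         return min(Q, greater[0] + 1)
--
--     # construct values to check
--     values_to_check = []
--     for i in greater:
--         values_to_check.append(i+1)
--     for i in less:
--         values_to_check.append(i-1)
--     values_to_check = sorted(values_to_check)
--
--     # find the values
--     best_score = len(less)
--     best_index = 0
--     for i in values_to_check:
--         g_temp = greater[:]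
--         g_temp.append(i)
--         g_temp = sorted(g_temp)
--         g_score = g_temp.index(i)
--
--         l_temp = less[:]
--         l_temp.append(i)
--         l_temp = sorted(l_temp, reverse=True)
--         l_score = l_temp.index(i)
--         total = g_score + l_score
--         if total > best_score:
--             best_score = total
--             best_index = i
--     return best_index
-- ===== SOURCE B (Python) =====
-- # Sorted sweep: sort once, then advance two monotone pointers over the ascending
-- # candidate list instead of re-sorting and scanning per candidate.
-- def find_opt_index(Q, greater, less):
--     # edge cases
--     if not greater and not less:
--         return 0
--     if not greater:
--         return max(0, less[0] - 1)
--     if not less: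
--         return min(Q, greater[0] + 1)
--
--     gs = sorted(greater)
--     ls = sorted(less)
--     candidates = sorted([g + 1 for g in greater] + [l - 1 for l in less])
--
--     pg = 0  # number of entries of gs strictly below the current candidate
--     pl = 0  # number of entries of ls at or below the current candidate
--     best_score = len(less)
--     best_index = 0
--     for c in candidates:
--         while pg < len(gs) and gs[pg] < c:
--             pg += 1
--         while pl < len(ls) and ls[pl] <= c:
--             pl += 1
--         total = pg + (len(ls) - pl)
--         if total > best_score:
--             best_score = total
--             best_index = c
--     return best_index
-- ===== Notes on version B (the rewrite author's own statement) =====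
-- stated objective: faster
-- what changed: Instead of copying, appending, re-sorting and .index-scanning both lists for every candidate, B sorts greater/less once and sweeps two monotone pointers over the ascending candidate list to get each candidate's score incrementally.
import Mathlib
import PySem

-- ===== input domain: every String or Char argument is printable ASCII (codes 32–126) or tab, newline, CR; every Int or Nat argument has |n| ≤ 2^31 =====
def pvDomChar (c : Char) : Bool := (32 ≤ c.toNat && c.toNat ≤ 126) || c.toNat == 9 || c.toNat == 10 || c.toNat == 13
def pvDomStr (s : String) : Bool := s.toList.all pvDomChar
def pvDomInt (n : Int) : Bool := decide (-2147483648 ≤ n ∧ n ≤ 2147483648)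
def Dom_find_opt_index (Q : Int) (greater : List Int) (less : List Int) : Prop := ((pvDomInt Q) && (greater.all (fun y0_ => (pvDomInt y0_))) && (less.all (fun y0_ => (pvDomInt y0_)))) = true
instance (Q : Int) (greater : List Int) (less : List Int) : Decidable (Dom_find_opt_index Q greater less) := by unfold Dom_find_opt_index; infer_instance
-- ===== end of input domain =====

-- B replaces A's per-candidate copy+sort+.index scoring by a one-off sort and a two-pointer
-- sweep over the ascending candidate list (asymptotically faster; equal return values proved below).


-- ===== PORT A =====
def find_opt_index (Q : Int) (greater : List Int) (less : List Int) : Int :=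
  if greater.isEmpty && less.isEmpty then 0
  else if greater.isEmpty then max 0 (PySem.List.pyGetD less 0 0 - 1)
  else if less.isEmpty then min Q (PySem.List.pyGetD greater 0 0 + 1)
  else
    -- values_to_check: greater's +1 values then less's -1 values, sorted
    let values := PySem.List.sorted (greater.map (fun i => i + 1) ++ less.map (fun i => i - 1)) (fun x => x)
    -- loop state = (best_score, best_index)
    let r := values.foldl (fun (st : Int × Int) i =>
        let g_temp := PySem.List.sorted (greater ++ [i]) (fun x => x)
        let g_score : Int := ((PySem.List.index? g_temp i).getD 0 : Nat)
        let l_temp := PySem.List.sorted (less ++ [i]) (fun x => x) true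
        let l_score : Int := ((PySem.List.index? l_temp i).getD 0 : Nat)
        let total := g_score + l_score
        if st.1 < total then (total, i) else st)
      ((less.length : Int), 0)
    r.2

-- ===== PORT B =====
-- advance p while xs[p] < c (the Python `while pg < len(gs) and gs[pg] < c`)
def advLt (xs : List Int) (p : Nat) (c : Int) : Nat :=
  if h : p < xs.length then
    if xs[p] < c then advLt xs (p + 1) c else p
  else p
termination_by xs.length - p

-- advance p while xs[p] <= c (the Python `while pl < len(ls) and ls[pl] <= c`)
def advLe (xs : List Int) (p : Nat) (c : Int) : Nat :=
  if h : p < xs.length then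
    if xs[p] ≤ c then advLe xs (p + 1) c else p
  else p
termination_by xs.length - p

def find_opt_index_alt (Q : Int) (greater : List Int) (less : List Int) : Int :=
  if greater.isEmpty && less.isEmpty then 0
  else if greater.isEmpty then max 0 (PySem.List.pyGetD less 0 0 - 1)
  else if less.isEmpty then min Q (PySem.List.pyGetD greater 0 0 + 1)
  else
    let gs := PySem.List.sorted greater (fun x => x)
    let ls := PySem.List.sorted less (fun x => x)
    let candidates := PySem.List.sorted (greater.map (fun g => g + 1) ++ less.map (fun l => l - 1)) (fun x => x)
    -- loop state = (pg, pl, best_score, best_index)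
    let r := candidates.foldl (fun (st : Nat × Nat × Int × Int) c =>
        let pg := advLt gs st.1 c
        let pl := advLe ls st.2.1 c
        let total : Int := (pg : Int) + ((ls.length : Int) - (pl : Int))
        if st.2.2.1 < total then (pg, pl, total, c) else (pg, pl, st.2.2.1, st.2.2.2))
      (0, 0, (less.length : Int), 0)
    r.2.2.2

-- ===== PRECONDITION & SPEC =====
def Spec_find_opt_index (Q : Int) (greater : List Int) (less : List Int) (out : Int) : Prop := out = find_opt_index_alt Q greater less
instance (Q : Int) (greater : List Int) (less : List Int) (out : Int) : Decidable (Spec_find_opt_index Q greater less out) := by unfold Spec_find_opt_index; infer_instance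

-- ===== CLAIM (what is proved, stated in full; the proofs are below) =====
def Claim_equal_find_opt_index : Prop := ∀ (Q : Int) (greater : List Int) (less : List Int), Dom_find_opt_index Q greater less → Spec_find_opt_index Q greater less (find_opt_index Q greater less)

-- ===== LEMMAS AND PROOFS =====

-- In a weakly increasing list, for a downward-closed predicate q, position j satisfies q
-- exactly when j lies below the count of q-satisfying elements.
theorem countP_char (q : Int → Bool) (hq : ∀ x y : Int, x ≤ y → q y = true → q x = true) :
    ∀ (xs : List Int), xs.Pairwise (· ≤ ·) → ∀ j (hj : j < xs.length),
      (j < xs.countP q ↔ q xs[j] = true) := by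
  intro xs
  induction xs with
  | nil => intro _ j hj; simp at hj
  | cons a t ih =>
    intro hp j hj
    rw [List.pairwise_cons] at hp
    obtain ⟨ha, hpt⟩ := hp
    have hzero : q a = false → t.countP q = 0 := by
      intro hqa
      apply List.countP_eq_zero.mpr
      intro x hx hqx
      have := hq a x (ha x hx) hqx
      simp [this] at hqa
    cases j with
    | zero =>
      simp only [List.getElem_cons_zero, List.countP_cons]
      cases hqa : q a with
      | true => simp
      | false => simp [hzero hqa]
    | succ j =>
      simp only [List.getElem_cons_succ, List.countP_cons]
      have hj' : j < t.length := by simpa using hj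
      cases hqa : q a with
      | true =>
        simp only [if_true]
        rw [Nat.add_lt_add_iff_right]
        exact ih hpt j hj'
      | false =>
        have hf : q t[j] = false := by
          cases hqt : q t[j] with
          | false => rfl
          | true =>
            exact absurd (hq a t[j] (ha _ (List.getElem_mem hj')) hqt) (by simp [hqa])
        simp [hzero hqa, hf]

-- First index of i in an ascending list = number of elements strictly below i.
theorem index?_sorted_asc (i : Int) :
    ∀ (s : List Int), s.Pairwise (· ≤ ·) → i ∈ s →
      PySem.List.index? s i = some (s.countP (fun x => decide (x < i))) := by
  intro s
  induction s with
  | nil => intro _ h; simp at h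
  | cons a t ih =>
    intro hp hm
    rw [List.pairwise_cons] at hp
    obtain ⟨ha, hpt⟩ := hp
    by_cases hai : a = i
    · subst hai
      rw [PySem.List.index?_cons_self]
      have h0 : t.countP (fun x => decide (x < a)) = 0 := by
        apply List.countP_eq_zero.mpr
        intro x hx
        have := ha x hx
        simp; omega
      simp [h0]
    · have hmt : i ∈ t := by
        rcases List.mem_cons.mp hm with h | h
        · exact absurd h.symm hai
        · exact h
      rw [PySem.List.index?_cons_of_ne t hai, ih hpt hmt]
      have hlt : a < i := lt_of_le_of_ne (ha i hmt) hai
      simp [hlt]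

-- First index of i in a descending list = number of elements strictly above i.
theorem index?_sorted_desc (i : Int) :
    ∀ (s : List Int), s.Pairwise (fun a b => b ≤ a) → i ∈ s →
      PySem.List.index? s i = some (s.countP (fun x => decide (i < x))) := by
  intro s
  induction s with
  | nil => intro _ h; simp at h
  | cons a t ih =>
    intro hp hm
    rw [List.pairwise_cons] at hp
    obtain ⟨ha, hpt⟩ := hp
    by_cases hai : a = i
    · subst hai
      rw [PySem.List.index?_cons_self]
      have h0 : t.countP (fun x => decide (a < x)) = 0 := by
        apply List.countP_eq_zero.mpr
        intro x hx
        have := ha x hx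
        simp; omega
      simp [h0]
    · have hmt : i ∈ t := by
        rcases List.mem_cons.mp hm with h | h
        · exact absurd h.symm hai
        · exact h
      rw [PySem.List.index?_cons_of_ne t hai, ih hpt hmt]
      have hlt : i < a := lt_of_le_of_ne (ha i hmt) (fun h => hai h.symm)
      simp [hlt]

-- A's g_score: index of i in sorted(greater + [i]) counts greater's elements below i.
theorem gscore_eq (l : List Int) (i : Int) :
    (PySem.List.index? (PySem.List.sorted (l ++ [i]) (fun x => x)) i).getD 0
      = l.countP (fun x => decide (x < i)) := by
  have hp := PySem.List.sorted_pairwise (l ++ [i]) (fun x => x)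
  have hm : i ∈ PySem.List.sorted (l ++ [i]) (fun x => x) := by
    rw [PySem.List.mem_sorted]; exact List.mem_concat_self
  rw [index?_sorted_asc i _ hp hm]
  have hperm := PySem.List.sorted_perm (l ++ [i]) (fun x => x) false
  rw [hperm.countP_congr (fun x _ => rfl)]
  simp [List.countP_append]

-- A's l_score: index of i in sorted(less + [i], reverse=True) counts less's elements above i.
theorem lscore_eq (l : List Int) (i : Int) :
    (PySem.List.index? (PySem.List.sorted (l ++ [i]) (fun x => x) true) i).getD 0
      = l.countP (fun x => decide (i < x)) := by
  have hp := PySem.List.sorted_pairwise_rev (l ++ [i]) (fun x => x)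
  have hm : i ∈ PySem.List.sorted (l ++ [i]) (fun x => x) true := by
    rw [PySem.List.mem_sorted]; exact List.mem_concat_self
  rw [index?_sorted_desc i _ hp hm]
  have hperm := PySem.List.sorted_perm (l ++ [i]) (fun x => x) true
  rw [hperm.countP_congr (fun x _ => rfl)]
  simp [List.countP_append]

-- B's first while loop lands exactly on the count of elements < c.
theorem advLt_eq (xs : List Int) (p : Nat) (c : Int) (hp : xs.Pairwise (· ≤ ·))
    (hle : p ≤ xs.countP (fun x => decide (x < c))) :
    advLt xs p c = xs.countP (fun x => decide (x < c)) := by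
  have hq : ∀ x y : Int, x ≤ y → (decide (x < c) : Bool) = true → (decide (x < c) : Bool) = true :=
    fun _ _ _ h => h
  fun_induction advLt xs p c with
  | case1 p h hlt ih =>
    apply ih
    have := (countP_char (fun x => decide (x < c)) (by intro x y hxy h; simp at h ⊢; omega) xs hp p h).mpr (by simpa using hlt)
    omega
  | case2 p h hlt =>
    have hnot := (countP_char (fun x => decide (x < c)) (by intro x y hxy h; simp at h ⊢; omega) xs hp p h)
    have : ¬ p < xs.countP (fun x => decide (x < c)) := by
      intro hc
      exact hlt (by simpa using hnot.mp hc)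
    omega
  | case3 p h =>
    have := List.countP_le_length (p := fun x => decide (x < c)) (l := xs)
    omega

-- B's second while loop lands exactly on the count of elements ≤ c.
theorem advLe_eq (xs : List Int) (p : Nat) (c : Int) (hp : xs.Pairwise (· ≤ ·))
    (hle : p ≤ xs.countP (fun x => decide (x ≤ c))) :
    advLe xs p c = xs.countP (fun x => decide (x ≤ c)) := by
  fun_induction advLe xs p c with
  | case1 p h hlt ih =>
    apply ih
    have := (countP_char (fun x => decide (x ≤ c)) (by intro x y hxy h; simp at h ⊢; omega) xs hp p h).mpr (by simpa using hlt)
    omega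
  | case2 p h hlt =>
    have hnot := (countP_char (fun x => decide (x ≤ c)) (by intro x y hxy h; simp at h ⊢; omega) xs hp p h)
    have : ¬ p < xs.countP (fun x => decide (x ≤ c)) := by
      intro hc
      exact hlt (by simpa using hnot.mp hc)
    omega
  | case3 p h =>
    have := List.countP_le_length (p := fun x => decide (x ≤ c)) (l := xs)
    omega

-- The two folds agree: B's pointer state always re-synchronises to the counts A recomputes
-- by sorting and scanning per candidate.
theorem fold_eq (greater less gs ls : List Int)
    (hgs : gs.Pairwise (· ≤ ·)) (hls : ls.Pairwise (· ≤ ·))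
    (hgp : gs.Perm greater) (hlp : ls.Perm less) :
    ∀ (cs : List Int), cs.Pairwise (· ≤ ·) →
    ∀ (pg pl : Nat) (bs bi : Int),
      (∀ c ∈ cs, pg ≤ gs.countP (fun x => decide (x < c))) →
      (∀ c ∈ cs, pl ≤ ls.countP (fun x => decide (x ≤ c))) →
      (cs.foldl (fun (st : Nat × Nat × Int × Int) c =>
          let pg := advLt gs st.1 c
          let pl := advLe ls st.2.1 c
          let total : Int := (pg : Int) + ((ls.length : Int) - (pl : Int))
          if st.2.2.1 < total then (pg, pl, total, c) else (pg, pl, st.2.2.1, st.2.2.2))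
        (pg, pl, bs, bi)).2.2
      = cs.foldl (fun (st : Int × Int) i =>
          let g_temp := PySem.List.sorted (greater ++ [i]) (fun x => x)
          let g_score : Int := ((PySem.List.index? g_temp i).getD 0 : Nat)
          let l_temp := PySem.List.sorted (less ++ [i]) (fun x => x) true
          let l_score : Int := ((PySem.List.index? l_temp i).getD 0 : Nat)
          let total := g_score + l_score
          if st.1 < total then (total, i) else st)
        (bs, bi) := by
  intro cs
  induction cs with
  | nil => intro _ pg pl bs bi _ _; rfl
  | cons c cs ih =>
    intro hp pg pl bs bi hpg hpl
    rw [List.pairwise_cons] at hp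
    obtain ⟨hc, hp'⟩ := hp
    simp only [List.foldl_cons]
    rw [advLt_eq gs pg c hgs (hpg c List.mem_cons_self),
        advLe_eq ls pl c hls (hpl c List.mem_cons_self),
        gscore_eq greater c, lscore_eq less c]
    have hKg : gs.countP (fun x => decide (x < c)) = greater.countP (fun x => decide (x < c)) :=
      hgp.countP_congr (fun x _ => rfl)
    have hKl : ls.countP (fun x => decide (x ≤ c)) = less.countP (fun x => decide (x ≤ c)) :=
      hlp.countP_congr (fun x _ => rfl)
    have hcomp : less.countP (fun x => decide (c < x)) + less.countP (fun x => decide (x ≤ c))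
        = less.length := by
      have h1 := List.length_eq_countP_add_countP (fun x => decide (x ≤ c)) (l := less)
      have h2 : less.countP (fun a => decide (¬ (decide (a ≤ c) = true)))
          = less.countP (fun x => decide (c < x)) := by
        apply List.countP_congr
        intro x _
        by_cases h : x ≤ c
        · simp [h]
        · simp [h]; omega
      omega
    have htot : ((gs.countP (fun x => decide (x < c)) : Int)
          + ((ls.length : Int) - (ls.countP (fun x => decide (x ≤ c)) : Int)))
        = ((greater.countP (fun x => decide (x < c)) : Nat) : Int)
          + ((less.countP (fun x => decide (c < x)) : Nat) : Int) := by
      rw [hKg, hKl, hlp.length_eq]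
      omega
    rw [htot]
    have hpg' : ∀ c' ∈ cs, gs.countP (fun x => decide (x < c))
        ≤ gs.countP (fun x => decide (x < c')) := by
      intro c' hc'
      apply List.countP_mono_left
      intro x _ h
      have := hc c' hc'
      simp at h ⊢; omega
    have hpl' : ∀ c' ∈ cs, ls.countP (fun x => decide (x ≤ c))
        ≤ ls.countP (fun x => decide (x ≤ c')) := by
      intro c' hc'
      apply List.countP_mono_left
      intro x _ h
      have := hc c' hc'
      simp at h ⊢; omega
    by_cases hb : bs < ((greater.countP (fun x => decide (x < c)) : Nat) : Int)
        + ((less.countP (fun x => decide (c < x)) : Nat) : Int)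
    · simp only [hb, if_true]
      exact ih hp' _ _ _ _ hpg' hpl'
    · simp only [hb, if_false]
      exact ih hp' _ _ _ _ hpg' hpl'

-- ===== VERDICT (by name: the statement is the Claim_ definition above) =====
theorem find_opt_index_spec : Claim_equal_find_opt_index := by
  intro Q greater less _
  unfold Spec_find_opt_index find_opt_index find_opt_index_alt
  split_ifs with h1 h2 h3
  · rfl
  · rfl
  · rfl
  · exact (congrArg Prod.snd (fold_eq greater less _ _
      (PySem.List.sorted_pairwise greater (fun x => x))
      (PySem.List.sorted_pairwise less (fun x => x))
      (PySem.List.sorted_perm greater (fun x => x) false)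
      (PySem.List.sorted_perm less (fun x => x) false)
      (PySem.List.sorted (greater.map (fun i => i + 1) ++ less.map (fun i => i - 1)) (fun x => x))
      (PySem.List.sorted_pairwise _ (fun x => x))
      0 0 (less.length : Int) 0
      (fun _ _ => Nat.zero_le _) (fun _ _ => Nat.zero_le _))).symm
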